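-- pv_equiv track=rewrite | github.com/sumanshah7/careerlens-ai | backend/app/services/dedalus_svc.py | _generate_why_and_fix
-- ===== SOURCE A (Python) =====
-- from typing import List, Dict, Any, Optional, Callable
--
-- def _generate_why_and_fix(resume_skills: List[str], jd_skills: List[str], resume_gaps: List[str], match_score: int) -> tuple[List[str], List[str]]:
--     """Generate why[] and fix[] arrays based on skill analysis"""
--     resume_skills_lower = [s.lower() for s in resume_skills]
--     jd_skills_lower = [s.lower() for s in jd_skills]
--     resume_gaps_lower = [s.lower() for s in resume_gaps]
--
--     # Find matching skills for "why"
--     matching_skills = [skill for skill in jd_skills if skill.lower() in resume_skills_lower]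
--     why_items = []
--     if matching_skills:
--         why_items.append(f"Strong experience with {', '.join(matching_skills[:2])}")
--     if match_score >= 70:
--         why_items.append("Good overall skill alignment with role requirements")
--     if len(matching_skills) >= 3:
--         why_items.append("Multiple relevant skills match the job description")
--
--     # Find gaps for "fix"
--     gaps_in_jd = [skill for skill in jd_skills if skill.lower() in resume_gaps_lower]
--     missing_skills = [skill for skill in jd_skills if skill.lower() not in resume_skills_lower and skill.lower() not in resume_gaps_lower]
--
--     fix_items = []
--     if gaps_in_jd:
--         fix_items.append(f"Gain more experience with {', '.join(gaps_in_jd[:2])}")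
--     if missing_skills:
--         fix_items.append(f"Learn {', '.join(missing_skills[:2])}")
--     if not gaps_in_jd and not missing_skills and match_score < 80:
--         fix_items.append("Improve depth in existing skills")
--
--     return why_items[:3], fix_items[:3]  # Limit to 3 items each
-- ===== SOURCE B (Python) =====
-- from typing import List
--
-- def _generate_why_and_fix(resume_skills: List[str], jd_skills: List[str], resume_gaps: List[str], match_score: int) -> tuple[List[str], List[str]]:
--     """Bounded-state scan: instead of materialising the matching/gap/missing lists,
--     keep only the first two samples of each category and a match counter capped at 3,
--     and stop scanning early once that state is saturated."""
--     res = {s.lower() for s in resume_skills}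
--     gap = {s.lower() for s in resume_gaps}
--     m2 = []   # first two matching jd skills (original case)
--     mc = 0    # number of matching jd skills, capped at 3
--     g2 = []   # first two jd skills that are resume gaps
--     s2 = []   # first two jd skills in neither list
--     for sk in jd_skills:
--         if mc == 3 and len(g2) == 2 and len(s2) == 2:
--             break  # nothing below can change any further
--         lo = sk.lower()
--         in_res = lo in res
--         in_gap = lo in gap
--         if in_res and len(m2) < 2:
--             m2.append(sk)
--         if in_res and mc < 3:
--             mc += 1
--         if in_gap and len(g2) < 2:
--             g2.append(sk)
--         if not in_res and not in_gap and len(s2) < 2: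
--             s2.append(sk)
--     why = []
--     if m2:
--         why.append("Strong experience with " + ", ".join(m2))
--     if match_score >= 70:
--         why.append("Good overall skill alignment with role requirements")
--     if mc >= 3:
--         why.append("Multiple relevant skills match the job description")
--     fix = []
--     if g2:
--         fix.append("Gain more experience with " + ", ".join(g2))
--     if s2:
--         fix.append("Learn " + ", ".join(s2))
--     if not g2 and not s2 and match_score < 80:
--         fix.append("Improve depth in existing skills")
--     return why, fix
-- ===== Notes on version B (the rewrite author's own statement) =====
-- stated objective: faster
-- what changed: Replaces A's three full list-comprehension scans (each doing a linear membership test over a lowered list) and the subsequent slicing/joining of whole category lists by a single bounded-state scan that keeps only the first two samples per category and a match counter capped at 3, breaks out of the loop once this O(1) state is saturated, and never materialises the matching/gap/missing lists or needs the final [:3] slices.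
import Mathlib
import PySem

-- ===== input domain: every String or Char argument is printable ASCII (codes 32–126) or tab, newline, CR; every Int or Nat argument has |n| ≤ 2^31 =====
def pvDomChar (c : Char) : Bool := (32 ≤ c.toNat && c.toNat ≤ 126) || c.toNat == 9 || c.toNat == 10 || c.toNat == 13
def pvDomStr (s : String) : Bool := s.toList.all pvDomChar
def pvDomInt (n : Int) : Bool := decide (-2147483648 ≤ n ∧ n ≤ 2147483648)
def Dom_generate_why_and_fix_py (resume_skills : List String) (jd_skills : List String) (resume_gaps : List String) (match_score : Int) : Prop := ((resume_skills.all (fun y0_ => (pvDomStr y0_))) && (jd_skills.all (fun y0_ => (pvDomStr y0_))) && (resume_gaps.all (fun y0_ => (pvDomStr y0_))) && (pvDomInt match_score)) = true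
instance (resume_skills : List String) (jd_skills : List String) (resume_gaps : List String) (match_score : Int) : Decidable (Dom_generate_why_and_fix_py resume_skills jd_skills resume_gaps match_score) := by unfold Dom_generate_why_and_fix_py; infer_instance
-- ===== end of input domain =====

-- B replaces A's three full scans and list slicing by one bounded-state scan (first-two samples
-- per category + a capped counter) with an early break once the state is saturated; objective: faster.

-- ===== PORT A =====
def generate_why_and_fix_py (resume_skills : List String) (jd_skills : List String) (resume_gaps : List String) (match_score : Int) : List String × List String :=
  let resume_skills_lower := resume_skills.map PySem.Str.lower
  let _jd_skills_lower := jd_skills.map PySem.Str.lower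
  let resume_gaps_lower := resume_gaps.map PySem.Str.lower
  let matching_skills := jd_skills.filter (fun skill => resume_skills_lower.contains (PySem.Str.lower skill))
  let why_items : List String := []
  let why_items := if !matching_skills.isEmpty then why_items ++ ["Strong experience with " ++ PySem.Str.join ", " (PySem.List.slice matching_skills none (some 2))] else why_items
  let why_items := if match_score ≥ 70 then why_items ++ ["Good overall skill alignment with role requirements"] else why_items
  let why_items := if matching_skills.length ≥ 3 then why_items ++ ["Multiple relevant skills match the job description"] else why_items
  let gaps_in_jd := jd_skills.filter (fun skill => resume_gaps_lower.contains (PySem.Str.lower skill))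
  let missing_skills := jd_skills.filter (fun skill => !resume_skills_lower.contains (PySem.Str.lower skill) && !resume_gaps_lower.contains (PySem.Str.lower skill))
  let fix_items : List String := []
  let fix_items := if !gaps_in_jd.isEmpty then fix_items ++ ["Gain more experience with " ++ PySem.Str.join ", " (PySem.List.slice gaps_in_jd none (some 2))] else fix_items
  let fix_items := if !missing_skills.isEmpty then fix_items ++ ["Learn " ++ PySem.Str.join ", " (PySem.List.slice missing_skills none (some 2))] else fix_items
  let fix_items := if gaps_in_jd.isEmpty && missing_skills.isEmpty && decide (match_score < 80) then fix_items ++ ["Improve depth in existing skills"] else fix_items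
  (PySem.List.slice why_items none (some 3), PySem.List.slice fix_items none (some 3))

-- ===== PORT B =====
-- the bounded-state loop of Source B: the 'break' is the first base case
def pvScan (res gap : PySem.Set String) : List String → List String → Nat → List String → List String → List String × Nat × List String × List String
  | [], m2, mc, g2, s2 => (m2, mc, g2, s2)
  | sk :: rest, m2, mc, g2, s2 =>
    if mc == 3 && g2.length == 2 && s2.length == 2 then (m2, mc, g2, s2)
    else
      let lo := PySem.Str.lower sk
      let in_res := PySem.Set.contains res lo
      let in_gap := PySem.Set.contains gap lo
      let m2' := if in_res && decide (m2.length < 2) then m2 ++ [sk] else m2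
      let mc' := if in_res && decide (mc < 3) then mc + 1 else mc
      let g2' := if in_gap && decide (g2.length < 2) then g2 ++ [sk] else g2
      let s2' := if !in_res && !in_gap && decide (s2.length < 2) then s2 ++ [sk] else s2
      pvScan res gap rest m2' mc' g2' s2'

def generate_why_and_fix_py_alt (resume_skills : List String) (jd_skills : List String) (resume_gaps : List String) (match_score : Int) : List String × List String :=
  let res : PySem.Set String := PySem.Set.ofList (resume_skills.map PySem.Str.lower)
  let gap : PySem.Set String := PySem.Set.ofList (resume_gaps.map PySem.Str.lower)
  let st := pvScan res gap jd_skills [] 0 [] []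
  let m2 := st.1
  let mc := st.2.1
  let g2 := st.2.2.1
  let s2 := st.2.2.2
  let why : List String := []
  let why := if !m2.isEmpty then why ++ ["Strong experience with " ++ PySem.Str.join ", " m2] else why
  let why := if match_score ≥ 70 then why ++ ["Good overall skill alignment with role requirements"] else why
  let why := if mc ≥ 3 then why ++ ["Multiple relevant skills match the job description"] else why
  let fix : List String := []
  let fix := if !g2.isEmpty then fix ++ ["Gain more experience with " ++ PySem.Str.join ", " g2] else fix
  let fix := if !s2.isEmpty then fix ++ ["Learn " ++ PySem.Str.join ", " s2] else fix
  let fix := if g2.isEmpty && s2.isEmpty && decide (match_score < 80) then fix ++ ["Improve depth in existing skills"] else fix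
  (why, fix)

-- ===== PRECONDITION & SPEC =====
def Spec_generate_why_and_fix_py (resume_skills : List String) (jd_skills : List String) (resume_gaps : List String) (match_score : Int) (out : List String × List String) : Prop := out = generate_why_and_fix_py_alt resume_skills jd_skills resume_gaps match_score
instance (resume_skills : List String) (jd_skills : List String) (resume_gaps : List String) (match_score : Int) (out : List String × List String) : Decidable (Spec_generate_why_and_fix_py resume_skills jd_skills resume_gaps match_score out) := by unfold Spec_generate_why_and_fix_py; infer_instance

-- ===== CLAIM =====
def Claim_equal_generate_why_and_fix_py : Prop := ∀ (resume_skills : List String) (jd_skills : List String) (resume_gaps : List String) (match_score : Int), Dom_generate_why_and_fix_py resume_skills jd_skills resume_gaps match_score → Spec_generate_why_and_fix_py resume_skills jd_skills resume_gaps match_score (generate_why_and_fix_py resume_skills jd_skills resume_gaps match_score)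

-- ===== LEMMAS AND PROOFS =====

-- membership in the deduplicated set equals membership in the raw lowered list
theorem set_contains_eq (xs : List String) (y : String) :
    PySem.Set.contains (PySem.Set.ofList xs) y = xs.contains y := by
  simp only [PySem.Set.contains_eq_listContains]
  by_cases h : y ∈ xs
  · simp [h, (PySem.Set.mem_ofList _ _).2 h]
  · simp [h, mt (PySem.Set.mem_ofList _ _).1 h]

-- helper: take 2 of a length-2 prefix
theorem take2_sat {a : Type} (xs ys : List a) (h : xs.length = 2) : (xs ++ ys).take 2 = xs := by
  rw [← h, List.take_left]

theorem take_of_len_le {a : Type} (xs : List a) (n : Nat) (h : xs.length ≤ n) : xs.take n = xs :=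
  List.take_of_length_le h

-- capped append step: appending only while below the cap agrees with take 2 of the full list
theorem cap2_step {a : Type} (xs F : List a) (x : a) (h : xs.length ≤ 2) :
    (xs ++ x :: F).take 2 = ((if decide (xs.length < 2) = true then xs ++ [x] else xs) ++ F).take 2 := by
  by_cases hl : xs.length < 2
  · simp [hl, List.append_assoc]
  · have h2 : xs.length = 2 := by omega
    simp [hl, take2_sat _ _ h2]

-- capped counter step
theorem cap3_step (mc k : Nat) :
    min (mc + (k + 1)) 3 = min ((if decide (mc < 3) = true then mc + 1 else mc) + k) 3 := by
  by_cases h : mc < 3 <;> simp [h] <;> omega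

-- B's bounded-state scan (with its early break) computes the capped projections of A's filters

theorem scan_eq (res gap : PySem.Set String) (jd : List String) :
    ∀ (m2 g2 s2 : List String) (mc : Nat),
      m2.length = min mc 2 → mc ≤ 3 → g2.length ≤ 2 → s2.length ≤ 2 →
    pvScan res gap jd m2 mc g2 s2 =
      ((m2 ++ jd.filter (fun sk => PySem.Set.contains res (PySem.Str.lower sk))).take 2,
       min (mc + (jd.filter (fun sk => PySem.Set.contains res (PySem.Str.lower sk))).length) 3,
       (g2 ++ jd.filter (fun sk => PySem.Set.contains gap (PySem.Str.lower sk))).take 2,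
       (s2 ++ jd.filter (fun sk => !PySem.Set.contains res (PySem.Str.lower sk) && !PySem.Set.contains gap (PySem.Str.lower sk))).take 2) := by
  induction jd with
  | nil =>
    intro m2 g2 s2 mc hm hc hg hs
    simp only [pvScan, List.filter_nil, List.append_nil, List.length_nil, Nat.add_zero]
    have h2 : m2.length ≤ 2 := by omega
    rw [take_of_len_le m2 2 h2, take_of_len_le g2 2 hg, take_of_len_le s2 2 hs]
    have : min mc 3 = mc := by omega
    rw [this]
  | cons x xs ih =>
    intro m2 g2 s2 mc hm hc hg hs
    simp only [pvScan]
    by_cases hbr : (mc == 3 && g2.length == 2 && s2.length == 2) = true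
    · rw [if_pos hbr]
      simp only [Bool.and_eq_true, beq_iff_eq] at hbr
      obtain ⟨⟨h3, hg2⟩, hs2⟩ := hbr
      have hm2 : m2.length = 2 := by omega
      rw [take2_sat _ _ hm2, take2_sat _ _ hg2, take2_sat _ _ hs2]
      have : min (mc + (List.filter (fun sk => PySem.Set.contains res (PySem.Str.lower sk)) (x :: xs)).length) 3 = mc := by omega
      rw [this]
    · rw [if_neg hbr]
      simp only [List.filter_cons]
      by_cases hR : PySem.Set.contains res (PySem.Str.lower x) = true <;>
        by_cases hG : PySem.Set.contains gap (PySem.Str.lower x) = true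
      all_goals simp only [hR, hG, Bool.true_and, Bool.false_and, Bool.not_true, Bool.not_false,
        Bool.and_true, Bool.and_false, Bool.and_self, if_true, Bool.false_eq_true, if_false,
        List.length_cons]
      · -- in resume, in gaps
        have hm' : (if decide (m2.length < 2) = true then m2 ++ [x] else m2).length
            = min (if decide (mc < 3) = true then mc + 1 else mc) 2 := by
          by_cases h1 : m2.length < 2 <;> by_cases h2 : mc < 3 <;> simp [h1, h2] <;> omega
        have hc' : (if decide (mc < 3) = true then mc + 1 else mc) ≤ 3 := by
          by_cases h2 : mc < 3 <;> simp [h2] <;> omega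
        have hg' : (if decide (g2.length < 2) = true then g2 ++ [x] else g2).length ≤ 2 := by
          by_cases h1 : g2.length < 2 <;> simp [h1] <;> omega
        rw [ih _ _ _ _ hm' hc' hg' hs]
        refine congrArg₂ Prod.mk ?_ (congrArg₂ Prod.mk ?_ (congrArg₂ Prod.mk ?_ rfl))
        · exact (cap2_step m2 _ x (by omega)).symm
        · exact (cap3_step mc _).symm
        · exact (cap2_step g2 _ x (by omega)).symm
      · -- in resume only
        have hm' : (if decide (m2.length < 2) = true then m2 ++ [x] else m2).length
            = min (if decide (mc < 3) = true then mc + 1 else mc) 2 := by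
          by_cases h1 : m2.length < 2 <;> by_cases h2 : mc < 3 <;> simp [h1, h2] <;> omega
        have hc' : (if decide (mc < 3) = true then mc + 1 else mc) ≤ 3 := by
          by_cases h2 : mc < 3 <;> simp [h2] <;> omega
        rw [ih _ _ _ _ hm' hc' hg hs]
        refine congrArg₂ Prod.mk ?_ (congrArg₂ Prod.mk ?_ rfl)
        · exact (cap2_step m2 _ x (by omega)).symm
        · exact (cap3_step mc _).symm
      · -- in gaps only
        have hg' : (if decide (g2.length < 2) = true then g2 ++ [x] else g2).length ≤ 2 := by
          by_cases h1 : g2.length < 2 <;> simp [h1] <;> omega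
        rw [ih _ _ _ _ hm hc hg' hs]
        refine congrArg₂ Prod.mk rfl (congrArg₂ Prod.mk rfl (congrArg₂ Prod.mk ?_ rfl))
        exact (cap2_step g2 _ x (by omega)).symm
      · -- missing
        have hs' : (if decide (s2.length < 2) = true then s2 ++ [x] else s2).length ≤ 2 := by
          by_cases h1 : s2.length < 2 <;> simp [h1] <;> omega
        rw [ih _ _ _ _ hm hc hg hs']
        refine congrArg₂ Prod.mk rfl (congrArg₂ Prod.mk rfl (congrArg₂ Prod.mk rfl ?_))
        exact (cap2_step s2 _ x (by omega)).symm

-- ===== VERDICT =====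
set_option maxHeartbeats 2000000 in
theorem generate_why_and_fix_py_spec : Claim_equal_generate_why_and_fix_py := by
  intro resume_skills jd_skills resume_gaps match_score _
  show _ = _
  unfold generate_why_and_fix_py generate_why_and_fix_py_alt
  dsimp only
  rw [scan_eq _ _ jd_skills [] [] [] 0 (by simp) (by omega) (by simp) (by simp)]
  dsimp only
  simp only [set_contains_eq, List.nil_append, Nat.zero_add]
  generalize (List.filter (fun sk => (List.map PySem.Str.lower resume_skills).contains (PySem.Str.lower sk)) jd_skills) = M
  generalize (List.filter (fun sk => (List.map PySem.Str.lower resume_gaps).contains (PySem.Str.lower sk)) jd_skills) = G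
  generalize (List.filter (fun sk => !(List.map PySem.Str.lower resume_skills).contains (PySem.Str.lower sk) && !(List.map PySem.Str.lower resume_gaps).contains (PySem.Str.lower sk)) jd_skills) = S
  have hsl : ∀ (xs : List String), PySem.List.slice xs none (some 2) = xs.take 2 := by
    intro xs; have := PySem.List.slice_to_natCast (xs := xs) (b := 2); simpa using this
  have hM : (M.take 2).isEmpty = M.isEmpty := by cases M <;> simp
  have hG : (G.take 2).isEmpty = G.isEmpty := by cases G <;> simp
  have hS : (S.take 2).isEmpty = S.isEmpty := by cases S <;> simp
  have hC : min M.length 3 ≥ 3 ↔ M.length ≥ 3 := by omega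
  by_cases h1 : M = [] <;>
  by_cases h2 : match_score ≥ 70 <;>
  by_cases h3 : M.length ≥ 3 <;>
  by_cases h4 : G = [] <;>
  by_cases h5 : S = [] <;>
  by_cases h6 : match_score < 80 <;>
    simp_all [List.isEmpty_iff, PySem.List.slice, ← List.take_eq_take_min] <;>
    first
      | omega
      | ((repeat' split) <;> simp_all)
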